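-- pv_equiv track=rewrite | github.com/TheDavibob/AOC2021 | 2024/day21.py | step
-- ===== SOURCE A (Python) =====
-- position_map_0 = {
--     "7": (0, 0),
--     "8": (0, 1),
--     "9": (0, 2),
--     "4": (1, 0),
--     "5": (1, 1),
--     "6": (1, 2),
--     "1": (2, 0),
--     "2": (2, 1),
--     "3": (2, 2),
--     "0": (3, 1),
--     "A": (3, 2),
-- }
--
-- position_map_1 = {
--     "^": (0, 1),
--     "A": (0, 2),
--     "<": (1, 0),
--     "v": (1, 1),
--     ">": (1, 2),
-- }
--
-- direction_map = {
--     "^": (-1, 0),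
--     "<": (0, -1),
--     ">": (0, 1),
--     "v": (1, 0),
-- }
--
-- def step(state, key_press):
--     # state: up to inner layer (int), robot 1 (str), robot 2 (str)
--     output = None
--     if key_press == "A":
--         if len(state) == 1:
--             output = state[0]
--         else:
--             inner_state, output = step(state[:-1], state[-1])
--             state = inner_state + (state[-1],)
--     else:
--         direction_to_move = direction_map[key_press]
--         if len(state) > 1:
--             pos_map = position_map_1
--         else:
--             pos_map = position_map_0
--
--         current_position = pos_map[state[-1]]
--         new_position = tuple(c + d for c, d in zip(current_position, direction_to_move))
--         new_state = next(k for k, v in pos_map.items() if v == new_position)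
--
--         state = state[:-1] + (new_state,)
--
--     return state, output
-- ===== SOURCE B (Python) =====
-- position_map_0 = {
--     "7": (0, 0),
--     "8": (0, 1),
--     "9": (0, 2),
--     "4": (1, 0),
--     "5": (1, 1),
--     "6": (1, 2),
--     "1": (2, 0),
--     "2": (2, 1),
--     "3": (2, 2),
--     "0": (3, 1),
--     "A": (3, 2),
-- }
--
-- position_map_1 = {
--     "^": (0, 1),
--     "A": (0, 2),
--     "<": (1, 0),
--     "v": (1, 1),
--     ">": (1, 2),
-- }
--
-- direction_map = {
--     "^": (-1, 0),
--     "<": (0, -1),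
--     ">": (0, 1),
--     "v": (1, 0),
-- }
--
-- def step(state, key_press):
--     # Iterative version: peel the 'A' presses into a trail, do the one base
--     # action, then stitch the peeled suffix back on.
--     trail = []
--     while key_press == "A" and len(state) > 1:
--         trail.append(state[-1])
--         key_press = state[-1]
--         state = state[:-1]
--
--     if key_press == "A":
--         output = state[0]
--     else:
--         output = None
--         dr, dc = direction_map[key_press]
--         pos_map = position_map_1 if len(state) > 1 else position_map_0
--         r, c = pos_map[state[-1]]
--         new_position = (r + dr, c + dc)
--         new_state = next(k for k, v in pos_map.items() if v == new_position)
--         state = state[:-1] + (new_state,)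
--
--     for k in reversed(trail):
--         state = state + (k,)
--     return state, output
-- ===== Notes on version B (the rewrite author's own statement) =====
-- stated objective: alternative
-- what changed: Replaces A's recursive descent through the nested keypads by an iterative while-loop that peels the trailing 'A' presses into an explicit trail list, performs the single base action once, and then stitches the peeled suffix back on with a rebuild loop.
import Mathlib
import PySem

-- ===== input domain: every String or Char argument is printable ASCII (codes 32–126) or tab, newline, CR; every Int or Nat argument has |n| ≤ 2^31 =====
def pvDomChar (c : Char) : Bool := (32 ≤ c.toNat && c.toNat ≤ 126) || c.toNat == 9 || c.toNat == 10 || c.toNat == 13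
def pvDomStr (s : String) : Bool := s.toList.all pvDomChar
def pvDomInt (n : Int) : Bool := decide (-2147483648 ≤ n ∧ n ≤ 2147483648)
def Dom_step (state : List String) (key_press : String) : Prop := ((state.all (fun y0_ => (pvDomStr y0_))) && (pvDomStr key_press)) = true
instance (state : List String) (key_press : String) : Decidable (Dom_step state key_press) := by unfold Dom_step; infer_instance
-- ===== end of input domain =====

-- B replaces A's recursive descent by an explicit iterative peel/rebuild loop (same cost, different decomposition); equality of the two ports is proved unconditionally, Pre_step marks where the Python raises.

-- shared module-level dict constants (data, used by both ports)
def pvMap0 : PySem.Dict String (Int × Int) := PySem.Dict.mk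
  [("7",(0,0)),("8",(0,1)),("9",(0,2)),("4",(1,0)),("5",(1,1)),("6",(1,2)),
   ("1",(2,0)),("2",(2,1)),("3",(2,2)),("0",(3,1)),("A",(3,2))]
def pvMap1 : PySem.Dict String (Int × Int) := PySem.Dict.mk
  [("^",(0,1)),("A",(0,2)),("<",(1,0)),("v",(1,1)),(">",(1,2))]
def pvDirMap : PySem.Dict String (Int × Int) := PySem.Dict.mk
  [("^",(-1,0)),("<",(0,-1)),(">",(0,1)),("v",(1,0))]

-- ===== PORT A =====
-- literal recursive transliteration; where the Python raises (IndexError/KeyError/StopIteration) the port returns ([], none), excluded by Pre_step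
def step (state : List String) (key_press : String) : List String × Option String :=
  if key_press = "A" then
    if state.length = 1 then
      (state, PySem.List.pyGet? state 0)
    else
      match _h : PySem.List.pyGet? state (-1) with
      | none => ([], none)
      | some last =>
        let inner := step (PySem.List.slice state none (some (-1))) last
        (inner.1 ++ [last], inner.2)
  else
    match pvDirMap.get? key_press with
    | none => ([], none)
    | some d =>
      let posMap := if state.length > 1 then pvMap1 else pvMap0
      match PySem.List.pyGet? state (-1) with
      | none => ([], none)
      | some lastk =>
        match posMap.get? lastk with
        | none => ([], none)
        | some cur =>
          match posMap.items.find? (fun kv => kv.2 == (cur.1 + d.1, cur.2 + d.2)) with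
          | none => ([], none)
          | some kv => (PySem.List.slice state none (some (-1)) ++ [kv.1], none)
termination_by state.length
decreasing_by
  have hne : state ≠ [] := by
    intro hnil; rw [hnil] at _h; simp [PySem.List.pyGet?] at _h
  rw [PySem.List.slice_to_neg_one]
  have := List.length_pos_iff.mpr hne
  simp [List.length_dropLast]; omega

-- ===== PORT B =====
-- the while-loop of Source B: peel trailing 'A' presses, collecting the peeled keys in trail
def stepPeel (state : List String) (key_press : String) (trail : List String) :
    List String × String × List String :=
  if key_press = "A" ∧ state.length > 1 then
    match _h : PySem.List.pyGet? state (-1) with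
    | none => (state, key_press, trail)
    | some last => stepPeel (PySem.List.slice state none (some (-1))) last (trail ++ [last])
  else (state, key_press, trail)
termination_by state.length
decreasing_by
  have hne : state ≠ [] := by
    intro hnil; rw [hnil] at _h; simp [PySem.List.pyGet?] at _h
  rw [PySem.List.slice_to_neg_one]
  have := List.length_pos_iff.mpr hne
  simp [List.length_dropLast]; omega

-- the single base action after the loop (the if/else of Source B)
def pvBase (s : List String) (kp : String) : List String × Option String :=
  if kp = "A" then (s, PySem.List.pyGet? s 0)
  else
    match pvDirMap.get? kp with
    | none => ([], none)
    | some d =>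
      let posMap := if s.length > 1 then pvMap1 else pvMap0
      match PySem.List.pyGet? s (-1) with
      | none => ([], none)
      | some lastk =>
        match posMap.get? lastk with
        | none => ([], none)
        | some cur =>
          match posMap.items.find? (fun kv => kv.2 == (cur.1 + d.1, cur.2 + d.2)) with
          | none => ([], none)
          | some kv => (PySem.List.slice s none (some (-1)) ++ [kv.1], none)

-- 'for k in reversed(trail): state = state + (k,)'
def pvRebuild (trail : List String) (s : List String) : List String :=
  trail.reverse.foldl (fun acc k => acc ++ [k]) s

def step_alt (state : List String) (key_press : String) : List String × Option String :=
  let p := stepPeel state key_press []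
  let b := pvBase p.1 p.2.1
  (pvRebuild p.2.2 b.1, b.2)

-- ===== PRECONDITION & SPEC =====
-- helpers for Pre_step: number of trailing "A" keys, and validity of one keypad move
def pvTrailA (state : List String) : Nat := (state.reverse.takeWhile (fun x => x == "A")).length
def pvMoveOk (pm : PySem.Dict String (Int × Int)) (last kp : String) : Bool :=
  match pvDirMap.get? kp, pm.get? last with
  | some d, some cur => (pm.items.find? (fun kv => kv.2 == (cur.1 + d.1, cur.2 + d.2))).isSome
  | _, _ => false

-- Pre_step = exactly the inputs where the Python returns (no IndexError/KeyError/StopIteration):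
-- the state is nonempty and, after the trailing-'A' presses are peeled, either only output remains
-- to do, or the one keypad move stays on the pad (checked exhaustively against the Python).
def Pre_step (state : List String) (key_press : String) : Prop :=
  state ≠ [] ∧
  (if key_press = "A" then
     state.length - 1 ≤ pvTrailA state ∨
       pvMoveOk (if state.length - 1 - pvTrailA state > 1 then pvMap1 else pvMap0)
                (state.getD (state.length - 2 - pvTrailA state) "")
                (state.getD (state.length - 1 - pvTrailA state) "") = true
   else
     pvMoveOk (if state.length > 1 then pvMap1 else pvMap0)
              ((PySem.List.pyGet? state (-1)).getD "") key_press = true)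
instance (state : List String) (key_press : String) : Decidable (Pre_step state key_press) := by
  unfold Pre_step; infer_instance

def pvWitness_step : List String × String := (["<", "A"], "A")

def Spec_step (state : List String) (key_press : String) (out : List String × Option String) : Prop := out = step_alt state key_press
instance (state : List String) (key_press : String) (out : List String × Option String) : Decidable (Spec_step state key_press out) := by unfold Spec_step; infer_instance

-- ===== CLAIM (what is proved, stated in full; the proofs are below) =====
def Claim_equal_step : Prop := ∀ (state : List String) (key_press : String), Dom_step state key_press → Pre_step state key_press → Spec_step state key_press (step state key_press)

-- ===== LEMMAS AND PROOFS =====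

theorem pvRebuild_snoc (tr : List String) (x : String) (s : List String) :
    pvRebuild (tr ++ [x]) s = pvRebuild tr (s ++ [x]) := by
  simp [pvRebuild]

-- the base action agrees with one non-recursive step of A
theorem base_eq_step (s : List String) (kp : String)
    (h : ¬ (kp = "A" ∧ s.length > 1)) : step s kp = pvBase s kp := by
  rw [step, pvBase]
  by_cases hA : kp = "A"
  · subst hA
    have hlen : ¬ s.length > 1 := fun hl => h ⟨rfl, hl⟩
    by_cases h1 : s.length = 1
    · simp [h1]
    · have h0 : s.length = 0 := by omega
      have hnil : s = [] := List.length_eq_zero_iff.mp h0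
      subst hnil
      rfl
  · simp only [if_neg hA]

-- main invariant: peel + base + rebuild computes A's recursion
theorem peel_invariant : ∀ (n : Nat) (s : List String) (kp : String) (tr : List String),
    s.length ≤ n →
    (pvRebuild (stepPeel s kp tr).2.2 (pvBase (stepPeel s kp tr).1 (stepPeel s kp tr).2.1).1,
      (pvBase (stepPeel s kp tr).1 (stepPeel s kp tr).2.1).2)
    = (pvRebuild tr (step s kp).1, (step s kp).2) := by
  intro n
  induction n with
  | zero =>
    intro s kp tr hle
    have hs : s = [] := List.length_eq_zero_iff.mp (Nat.le_zero.mp hle)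
    subst hs
    rw [stepPeel, if_neg (by simp : ¬ (kp = "A" ∧ ([] : List String).length > 1)),
      base_eq_step _ _ (by simp)]
  | succ m ih =>
    intro s kp tr hle
    by_cases hc : kp = "A" ∧ s.length > 1
    · obtain ⟨hA, hlen⟩ := hc
      have hne : s ≠ [] := by intro h; rw [h] at hlen; simp at hlen
      have hget : PySem.List.pyGet? s (-1) = some (s.getLast hne) := by
        rw [PySem.List.pyGet?_neg_one, List.getLast?_eq_some_getLast]
      rw [stepPeel, step]
      have h1 : ¬ s.length = 1 := by omega
      simp only [hA, hlen, and_self, if_pos, h1, ite_false]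
      have hdl : (PySem.List.slice s none (some (-1))).length ≤ m := by
        rw [PySem.List.slice_to_neg_one]
        have := List.length_pos_iff.mpr hne
        simp [List.length_dropLast]; omega
      split
      next heq => rw [hget] at heq; cases heq
      next last heq =>
        rw [ih _ _ _ hdl, pvRebuild_snoc]
    · rw [stepPeel, if_neg hc, base_eq_step _ _ hc]

-- ===== VERDICT (by name: the statement is the Claim_ definition above) =====
theorem step_spec : Claim_equal_step := by
  intro state key_press _hdom _hpre
  unfold Spec_step step_alt
  have h := peel_invariant state.length state key_press [] (le_refl _)
  simp only [pvRebuild, List.reverse_nil, List.foldl_nil] at h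
  cases hs : step state key_press with
  | mk a b =>
    rw [hs] at h
    simp only [] at h
    exact Prod.ext (congrArg Prod.fst h.symm ▸ (by rw [← h])) (by rw [← h])
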